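-- pv_equiv track=rewrite | github.com/aguscurii05/IP-Algo-I | Parciales/SegundoParcial/Parcial.py | pos_umbral
-- ===== SOURCE A (Python) =====
-- def pos_umbral(s:list[int],u:int)->int:
--     suma:int=0
--     i:int=0
--     res:int=-1
--     while i<len(s):
--         if s[i]>=0:
--            suma+=s[i]
--         if suma>u:
--             res:int=i
--             i=len(s)
--         else:
--             i+=1
--     return res
-- ===== SOURCE B (Python) =====
-- def pos_umbral(s, u):
--     # B: build the clamped prefix-sum table, then search it for the first value > u.
--     prefix = []
--     total = 0
--     for x in s:
--         total += x if x >= 0 else 0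
--         prefix.append(total)
--     for i, p in enumerate(prefix):
--         if p > u:
--             return i
--     return -1
-- ===== Notes on version B (the rewrite author's own statement) =====
-- stated objective: alternative
-- what changed: Replaces A's fused accumulate-and-test while loop (with its i=len(s) exit trick and res variable) by two explicit passes: build a clamped prefix-sum table, then scan it for the first entry exceeding u.
import Mathlib
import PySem

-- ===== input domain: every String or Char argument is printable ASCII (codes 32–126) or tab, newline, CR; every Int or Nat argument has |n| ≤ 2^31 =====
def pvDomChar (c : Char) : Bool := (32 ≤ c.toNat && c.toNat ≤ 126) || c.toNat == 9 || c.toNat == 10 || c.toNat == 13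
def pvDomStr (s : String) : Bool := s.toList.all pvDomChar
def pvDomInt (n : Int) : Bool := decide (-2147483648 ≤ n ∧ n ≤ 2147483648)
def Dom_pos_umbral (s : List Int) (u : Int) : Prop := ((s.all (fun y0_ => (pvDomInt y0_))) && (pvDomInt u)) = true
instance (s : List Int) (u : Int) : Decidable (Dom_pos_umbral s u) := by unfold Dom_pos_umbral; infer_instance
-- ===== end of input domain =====

-- B replaces A's fused accumulate-and-test while loop with two explicit passes
-- (build the clamped prefix-sum table, then search it); alternative decomposition, same cost.

-- ===== PORT A =====
-- A's while loop: state (suma, i, res); on suma > u it sets res := i and i := len(s)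
-- (so the loop exits returning i); otherwise i += 1. Transliterated as recursion on len(s) - i.
def posUmbralLoop (s : List Int) (u : Int) (suma : Int) (i : Nat) (res : Int) : Int :=
  if h : i < s.length then
    let suma' := if s[i] ≥ 0 then suma + s[i] else suma
    if suma' > u then (i : Int) else posUmbralLoop s u suma' (i + 1) res
  else res
termination_by s.length - i

def pos_umbral (s : List Int) (u : Int) : Int := posUmbralLoop s u 0 0 (-1)

-- ===== PORT B =====
-- pass 1: clamped prefix sums
def pvPrefix (s : List Int) (total : Int) : List Int :=
  match s with
  | [] => []
  | x :: xs =>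
    let total' := total + (if x ≥ 0 then x else 0)
    total' :: pvPrefix xs total'

-- pass 2: first index whose prefix sum exceeds u
def pvSearch (u : Int) (prefix_ : List Int) (i : Nat) : Int :=
  match prefix_ with
  | [] => -1
  | p :: ps => if p > u then (i : Int) else pvSearch u ps (i + 1)

def pos_umbral_alt (s : List Int) (u : Int) : Int := pvSearch u (pvPrefix s 0) 0

-- ===== PRECONDITION & SPEC =====
def Spec_pos_umbral (s : List Int) (u : Int) (out : Int) : Prop := out = pos_umbral_alt s u
instance (s : List Int) (u : Int) (out : Int) : Decidable (Spec_pos_umbral s u out) := by unfold Spec_pos_umbral; infer_instance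

-- ===== CLAIM (what is proved, stated in full; the proofs are below) =====
def Claim_equal_pos_umbral : Prop := ∀ (s : List Int) (u : Int), Dom_pos_umbral s u → Spec_pos_umbral s u (pos_umbral s u)

-- ===== LEMMAS AND PROOFS =====
lemma loop_eq_search (s : List Int) (u : Int) : ∀ (n i : Nat) (suma : Int),
    s.length - i = n →
    posUmbralLoop s u suma i (-1) = pvSearch u (pvPrefix (s.drop i) suma) i := by
  intro n
  induction n with
  | zero =>
    intro i suma h
    have hle : s.length ≤ i := by omega
    rw [posUmbralLoop, dif_neg (by omega), List.drop_eq_nil_of_le hle]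
    rfl
  | succ k ih =>
    intro i suma h
    have hi : i < s.length := by omega
    have hdrop : s.drop i = s[i] :: s.drop (i + 1) := List.drop_eq_getElem_cons hi
    rw [posUmbralLoop, dif_pos hi, hdrop, pvPrefix]
    simp only [pvSearch]
    by_cases hb : (if s[i] ≥ 0 then suma + s[i] else suma) > u
    · have : suma + (if s[i] ≥ 0 then s[i] else 0) = if s[i] ≥ 0 then suma + s[i] else suma := by
        split_ifs <;> ring
      simp only [this]
      rw [if_pos hb, if_pos hb]
    · have heq : suma + (if s[i] ≥ 0 then s[i] else 0) = if s[i] ≥ 0 then suma + s[i] else suma := by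
        split_ifs <;> ring
      simp only [heq]
      rw [if_neg hb, if_neg hb]
      exact ih (i + 1) _ (by omega)

-- ===== VERDICT (by name: the statement is the Claim_ definition above) =====
theorem pos_umbral_spec : Claim_equal_pos_umbral := by
  intro s u _
  unfold Spec_pos_umbral pos_umbral pos_umbral_alt
  simpa using loop_eq_search s u s.length 0 0 rfl
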